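-- pv_equiv track=rewrite | github.com/LeeJin0527/Algorithm2023 | 프로그래머스/lv1/12930. 이상한 문자 만들기/이상한 문자 만들기.py | solution
-- ===== SOURCE A (Python) =====
-- def solution(array):
--
--     array = list(array)
--     index = 0
--     for idx, value in enumerate(array):
--         if value == ' ':
--             index = 0
--         elif index % 2 == 0:
--             array[idx] = value.upper()
--             index += 1
--         elif index % 2 == 1:
--             array[idx] = value.lower()
--             index += 1
--
--     return ''.join(array)
-- ===== SOURCE B (Python) =====
-- def solution(array):
--     return ' '.join(
--         ''.join(c.upper() if i % 2 == 0 else c.lower() for i, c in enumerate(word))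
--         for word in array.split(' ')
--     )
-- ===== Notes on version B (the rewrite author's own statement) =====
-- stated objective: idiomatic
-- what changed: Replaces the running counter with its reset-on-space branch by splitting on the single space character, transforming each word position-wise via enumerate, and joining the words back with spaces.
import Mathlib
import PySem

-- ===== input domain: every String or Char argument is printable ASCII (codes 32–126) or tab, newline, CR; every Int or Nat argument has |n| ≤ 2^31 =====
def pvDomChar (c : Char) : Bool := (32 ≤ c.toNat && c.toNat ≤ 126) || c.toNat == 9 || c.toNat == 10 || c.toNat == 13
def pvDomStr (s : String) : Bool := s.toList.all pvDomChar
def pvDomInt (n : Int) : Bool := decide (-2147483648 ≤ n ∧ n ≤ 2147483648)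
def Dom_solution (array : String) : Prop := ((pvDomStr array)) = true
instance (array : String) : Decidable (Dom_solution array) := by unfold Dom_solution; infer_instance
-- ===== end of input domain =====

-- B replaces A's running counter (reset on space) by a split-on-space / per-word transform / join decomposition: idiomatic, same cost.

-- ===== PORT A =====
-- the for-loop over enumerate(array) with the running counter `index`, rewriting the chars front to back
def solutionGo : List Char → Nat → List Char
  | [], _ => []
  | c :: rest, index =>
    if c = ' ' then c :: solutionGo rest 0
    else if index % 2 = 0 then PySem.Chars.upperChar c :: solutionGo rest (index + 1)
    else PySem.Chars.lowerChar c :: solutionGo rest (index + 1)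

def solution (array : String) : String :=
  String.ofList (solutionGo array.toList 0)

-- ===== PORT B =====
-- ''.join(c.upper() if i % 2 == 0 else c.lower() for i, c in enumerate(word))
def solutionWord (w : List Char) : List Char :=
  (PySem.List.enumerate w 0).map
    (fun p => if PySem.Int.mod p.1 2 = 0 then PySem.Chars.upperChar p.2 else PySem.Chars.lowerChar p.2)

def solution_alt (array : String) : String :=
  String.ofList
    (PySem.Chars.join [' '] ((PySem.Chars.splitOn array.toList [' ']).map solutionWord))

-- ===== PRECONDITION & SPEC =====
def Spec_solution (array : String) (out : String) : Prop := out = solution_alt array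
instance (array : String) (out : String) : Decidable (Spec_solution array out) := by unfold Spec_solution; infer_instance

-- ===== CLAIM (what is proved, stated in full; the proofs are below) =====
def Claim_equal_solution : Prop := ∀ (array : String), Dom_solution array → Spec_solution array (solution array)

-- ===== LEMMAS AND PROOFS =====

-- structural characterization of splitting on a single space
def mySplit : List Char → List (List Char)
  | [] => [[]]
  | c :: r =>
    if c = ' ' then [] :: mySplit r
    else
      match mySplit r with
      | [] => [[c]]
      | w :: ws => (c :: w) :: ws

lemma mySplit_ne_nil (l : List Char) : mySplit l ≠ [] := by
  cases l with
  | nil => simp [mySplit]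
  | cons c r =>
    simp only [mySplit]
    split_ifs
    · simp
    · cases h : mySplit r <;> simp

def modHead (cur : List Char) : List (List Char) → List (List Char)
  | [] => [cur.reverse]
  | w :: ws => (cur.reverse ++ w) :: ws

lemma splitOn_go_spec (fuel : Nat) :
    ∀ (l cur : List Char) (acc : List (List Char)), l.length < fuel →
      PySem.Chars.splitOn.go [' '] fuel l cur acc = acc.reverse ++ modHead cur (mySplit l) := by
  induction fuel with
  | zero => intro l cur acc h; omega
  | succ n ih =>
    intro l cur acc h
    cases l with
    | nil => simp [PySem.Chars.splitOn.go, mySplit, modHead]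
    | cons c rest =>
      rw [PySem.Chars.splitOn.go]
      by_cases hc : c = ' '
      · subst hc
        rw [if_pos (by simp [List.isPrefixOf])]
        simp only [List.length_singleton, List.drop_succ_cons, List.drop_zero]
        rw [ih rest [] (cur.reverse :: acc) (by simpa using Nat.lt_of_succ_lt_succ h)]
        obtain ⟨w, ws, hw⟩ := List.exists_cons_of_ne_nil (mySplit_ne_nil rest)
        simp [mySplit, hw, modHead]
      · rw [if_neg (by simp [List.isPrefixOf, List.isPrefixOf]; intro h'; exact hc h'.symm)]
        rw [ih rest (c :: cur) acc (by simpa using Nat.lt_of_succ_lt_succ h)]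
        obtain ⟨w, ws, hw⟩ := List.exists_cons_of_ne_nil (mySplit_ne_nil rest)
        simp [mySplit, hc, hw, modHead]

lemma splitOn_eq_mySplit (l : List Char) :
    PySem.Chars.splitOn l [' '] = mySplit l := by
  rw [PySem.Chars.splitOn, splitOn_go_spec (l.length + 1) l [] [] (by omega)]
  obtain ⟨w, ws, hw⟩ := List.exists_cons_of_ne_nil (mySplit_ne_nil l)
  simp [hw, modHead]

-- A's per-character transform starting the counter at i
def transFrom : Nat → List Char → List Char
  | _, [] => []
  | i, c :: r =>
    (if i % 2 = 0 then PySem.Chars.upperChar c else PySem.Chars.lowerChar c) :: transFrom (i + 1) r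

def joinFrom : Nat → List (List Char) → List Char
  | _, [] => []
  | i, [w] => transFrom i w
  | i, w :: ws => transFrom i w ++ ' ' :: joinFrom 0 ws

lemma solutionGo_eq_joinFrom (cs : List Char) : ∀ i, solutionGo cs i = joinFrom i (mySplit cs) := by
  induction cs with
  | nil => intro i; simp [solutionGo, mySplit, joinFrom, transFrom]
  | cons c rest ih =>
    intro i
    obtain ⟨w, ws, hw⟩ := List.exists_cons_of_ne_nil (mySplit_ne_nil rest)
    by_cases hc : c = ' '
    · subst hc
      simp only [solutionGo, mySplit, ih, hw]
      rfl
    · simp only [solutionGo, if_neg hc, mySplit, hw, ih]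
      cases ws with
      | nil => simp only [joinFrom, transFrom]; split <;> rfl
      | cons w' ws' => simp only [joinFrom, transFrom, List.cons_append]; split <;> rfl

lemma transFrom_eq_enum (w : List Char) : ∀ (i : Nat),
    ((PySem.List.enumerate w (i : Int)).map
      (fun p => if PySem.Int.mod p.1 2 = 0 then PySem.Chars.upperChar p.2 else PySem.Chars.lowerChar p.2))
      = transFrom i w := by
  induction w with
  | nil => intro i; simp [PySem.List.enumerate_nil, transFrom]
  | cons c r ih =>
    intro i
    rw [PySem.List.enumerate_cons]
    simp only [List.map_cons, transFrom]
    congr 1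
    · have hm : PySem.Int.mod (i : Int) 2 = ((i % 2 : Nat) : Int) := by
        simp [PySem.Int.mod, Int.fmod_eq_emod]
      rw [hm]
      by_cases h : i % 2 = 0 <;> simp [h]; omega
    · have := ih (i + 1)
      push_cast at this ⊢
      exact this

lemma transFrom_zero (w : List Char) : transFrom 0 w = solutionWord w := by
  rw [solutionWord, ← transFrom_eq_enum w 0]
  norm_num

lemma joinFrom_zero (l : List (List Char)) :
    joinFrom 0 l = PySem.Chars.join [' '] (l.map solutionWord) := by
  induction l with
  | nil => simp [joinFrom, PySem.Chars.join, List.intercalate]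
  | cons w ws ih =>
    cases ws with
    | nil => simp [joinFrom, PySem.Chars.join, List.intercalate, transFrom_zero]
    | cons w' ws' =>
      show transFrom 0 w ++ ' ' :: joinFrom 0 (w' :: ws') = _
      rw [transFrom_zero, ih]
      simp [PySem.Chars.join, List.intercalate]

-- ===== VERDICT (by name: the statement is the Claim_ definition above) =====
theorem solution_spec : Claim_equal_solution := by
  intro array _
  unfold Spec_solution solution solution_alt
  rw [solutionGo_eq_joinFrom, ← splitOn_eq_mySplit, joinFrom_zero]
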